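-- pv_equiv track=rewrite | github.com/tongzxc/resume-screening | ict619_resume_functions.py | calculate_experience
-- ===== SOURCE A (Python) =====
-- def calculate_experience(year_ranges):
--     if not year_ranges:
--         return 0  # No experience if no years available
--
--     # Flatten the list to get all years (both start and end years)
--     all_years = []
--
--     for start_year, end_year in year_ranges:
--         # Add both start year and end year (for range)
--         all_years.append(start_year)
--         if isinstance(end_year, int):
--             all_years.append(end_year)
--
--     # Calculate the minimum and maximum year
--     min_year = min(all_years)
--     max_year = max(all_years)
--
--     # Calculate the total years of experience
--     experience_years = max_year - min_year
--     return experience_years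
-- ===== SOURCE B (Python) =====
-- def calculate_experience(year_ranges):
--     if not year_ranges:
--         return 0
--     min_year = max_year = year_ranges[0][0]
--     for start_year, end_year in year_ranges:
--         if start_year < min_year:
--             min_year = start_year
--         if start_year > max_year:
--             max_year = start_year
--         if isinstance(end_year, int):
--             if end_year < min_year:
--                 min_year = end_year
--             if end_year > max_year:
--                 max_year = end_year
--     return max_year - min_year
-- ===== Notes on version B (the rewrite author's own statement) =====
-- stated objective: alternative
-- what changed: Replaces A's build-a-flattened-list-then-min-then-max (three passes plus an intermediate list) with a single fused pass maintaining running min_year/max_year accumulators and no intermediate list.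
import Mathlib
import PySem

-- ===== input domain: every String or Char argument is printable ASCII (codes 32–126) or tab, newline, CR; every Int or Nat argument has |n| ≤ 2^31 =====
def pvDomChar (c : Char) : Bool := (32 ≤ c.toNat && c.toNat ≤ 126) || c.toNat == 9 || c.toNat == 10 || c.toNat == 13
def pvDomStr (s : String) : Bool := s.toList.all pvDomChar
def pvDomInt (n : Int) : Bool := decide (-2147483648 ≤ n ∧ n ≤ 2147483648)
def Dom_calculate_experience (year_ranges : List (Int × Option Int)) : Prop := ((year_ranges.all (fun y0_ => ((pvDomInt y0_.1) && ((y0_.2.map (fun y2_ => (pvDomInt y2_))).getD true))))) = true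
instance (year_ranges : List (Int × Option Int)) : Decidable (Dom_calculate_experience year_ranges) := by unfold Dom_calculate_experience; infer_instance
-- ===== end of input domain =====

-- ===== PORT A =====
-- one honest line: B fuses A's build-list + min + max passes into a single running min/max loop (alternative decomposition, same asymptotics).
-- loop body of A: append start_year, then end_year when it is an int
def pvStepA (acc : List Int) (p : Int × Option Int) : List Int :=
  let acc := acc ++ [p.1]
  match p.2 with
  | some e => acc ++ [e]
  | none => acc

def calculate_experience (year_ranges : List (Int × Option Int)) : Int :=
  if year_ranges = [] then 0
  else
    let all_years : List Int := year_ranges.foldl pvStepA []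
    -- min(all_years) / max(all_years); all_years is nonempty here, so the none
    -- branch (Python's ValueError on an empty list) is unreachable
    match PySem.List.min? all_years (fun x => x), PySem.List.max? all_years (fun x => x) with
    | some mn, some mx => mx - mn
    | _, _ => 0

-- ===== PORT B =====
-- loop body of B: fold start_year (and end_year when it is an int) into running (min_year, max_year)
def pvStepB (a : Int × Int) (p : Int × Option Int) : Int × Int :=
  let a := (if p.1 < a.1 then p.1 else a.1, if p.1 > a.2 then p.1 else a.2)
  match p.2 with
  | some e => (if e < a.1 then e else a.1, if e > a.2 then e else a.2)
  | none => a

def calculate_experience_alt (year_ranges : List (Int × Option Int)) : Int :=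
  match year_ranges with
  | [] => 0
  | (s0, _) :: _ =>
    let r := year_ranges.foldl pvStepB (s0, s0)
    r.2 - r.1

-- ===== PRECONDITION & SPEC =====
def Spec_calculate_experience (year_ranges : List (Int × Option Int)) (out : Int) : Prop := out = calculate_experience_alt year_ranges
instance (year_ranges : List (Int × Option Int)) (out : Int) : Decidable (Spec_calculate_experience year_ranges out) := by unfold Spec_calculate_experience; infer_instance

-- ===== CLAIM (what is proved, stated in full; the proofs are below) =====
def Claim_equal_calculate_experience : Prop := ∀ (year_ranges : List (Int × Option Int)), Dom_calculate_experience year_ranges → Spec_calculate_experience year_ranges (calculate_experience year_ranges)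

-- ===== LEMMAS AND PROOFS =====

-- ===== VERDICT (by name: the statement is the Claim_ definition above) =====
-- the years a pair contributes
def pvYears (p : Int × Option Int) : List Int := p.1 :: p.2.toList

theorem pvStepA_eq (acc : List Int) (p : Int × Option Int) :
    pvStepA acc p = acc ++ pvYears p := by
  obtain ⟨s, e⟩ := p
  cases e <;> simp [pvStepA, pvYears]

theorem pvA_foldl (l : List (Int × Option Int)) (acc : List Int) :
    l.foldl pvStepA acc = acc ++ l.flatMap pvYears := by
  induction l generalizing acc with
  | nil => simp
  | cons h t ih => simp [List.foldl_cons, pvStepA_eq, ih, List.append_assoc]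

theorem pvStepB_eq (a : Int × Int) (p : Int × Option Int) :
    pvStepB a p = ((pvYears p).foldl min a.1, (pvYears p).foldl max a.2) := by
  obtain ⟨s, e⟩ := p
  cases e <;>
    simp [pvStepB, pvYears, min_def, max_def] <;>
    constructor <;> split_ifs <;> omega

theorem pvB_foldl (l : List (Int × Option Int)) (mn mx : Int) :
    l.foldl pvStepB (mn, mx)
    = ((l.flatMap pvYears).foldl min mn, (l.flatMap pvYears).foldl max mx) := by
  induction l generalizing mn mx with
  | nil => simp
  | cons h t ih =>
    rw [List.foldl_cons, pvStepB_eq, ih]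
    simp [List.flatMap_cons, List.foldl_append]

theorem calculate_experience_spec : Claim_equal_calculate_experience := by
  intro yr _
  unfold Spec_calculate_experience calculate_experience calculate_experience_alt
  match yr with
  | [] => rfl
  | (s0, e0) :: t =>
    simp only [reduceCtorEq, if_false, pvA_foldl, pvB_foldl, List.nil_append]
    have hflat : ((s0, e0) :: t).flatMap pvYears = s0 :: (e0.toList ++ t.flatMap pvYears) := by
      simp [pvYears]
    rw [hflat, PySem.List.min?_id_cons, PySem.List.max?_id_cons]
    simp [min_self, max_self]
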